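-- pv_equiv track=rewrite | github.com/BitTrace-AI/bittrace_api_v3_source | src/bittrace/core/lean/engine.py | _select_prototypes
-- ===== SOURCE A (Python) =====
-- from collections.abc import Mapping, Sequence
--
-- def _select_prototypes(
--     train_bits: Sequence[int],
--     train_labels: Sequence[int],
--     class_labels: Sequence[int],
-- ) -> tuple[tuple[int, ...], tuple[int, ...]]:
--     prototypes: list[int] = []
--     prototype_labels: list[int] = []
--     for class_label in class_labels:
--         class_rows = [
--             row
--             for row, label in zip(train_bits, train_labels, strict=True)
--             if label == class_label
--         ]
--         if not class_rows:
--             raise ValueError(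
--                 f"Train split produced no rows for class `{class_label}`."
--             )
--         prototypes.append(_select_medoid(class_rows))
--         prototype_labels.append(class_label)
--     return tuple(prototypes), tuple(prototype_labels)
--
-- def _select_medoid(rows: Sequence[int]) -> int:
--     if len(rows) == 1:
--         return rows[0]
--     best_row = rows[0]
--     best_cost: int | None = None
--     for candidate in rows:
--         cost = sum(_hamming_distance(candidate, other) for other in rows)
--         if best_cost is None or cost < best_cost or (cost == best_cost and candidate < best_row):
--             best_row = candidate
--             best_cost = cost
--     return best_row
--
-- def _hamming_distance(left: int, right: int) -> int:
--     return (left ^ right).bit_count()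
-- ===== SOURCE B (Python) =====
-- # B: one-pass grouping by label (dict) instead of re-scanning the training set per class,
-- # and a single triangular pass over suffixes that charges each pair's distance to both
-- # endpoints, instead of recomputing the full distance sum for every candidate.
-- def _select_prototypes(train_bits, train_labels, class_labels):
--     groups = {}
--     for label, row in zip(train_labels, train_bits):
--         groups[label] = groups.get(label, []) + [row]
--     prototypes = [_medoid_by_pair_costs(groups[c]) for c in class_labels]
--     return tuple(prototypes), tuple(class_labels)
--
-- def _pair_costs(rows):
--     # costs[i] = sum of Hamming distances from rows[i] to every other row,
--     # accumulated back-to-front: each pair (head, r) contributes once, to both ends.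
--     costs = []
--     suffix = []
--     for head in reversed(rows):
--         ds = [(head ^ r).bit_count() for r in suffix]
--         costs = [sum(ds)] + [d + c for d, c in zip(ds, costs)]
--         suffix = [head] + suffix
--     return costs
--
-- def _medoid_by_pair_costs(rows):
--     costs = _pair_costs(rows)
--     best_row, best_cost = rows[0], costs[0]
--     for row, cost in zip(rows[1:], costs[1:]):
--         if cost < best_cost or (cost == best_cost and row < best_row):
--             best_row, best_cost = row, cost
--     return best_row
-- ===== Notes on version B (the rewrite author's own statement) =====
-- stated objective: alternative
-- what changed: B groups rows by label in one dict pass instead of rescanning the training set for every class, and computes all per-candidate distance sums in one triangular pass that charges each pair's Hamming distance to both endpoints, instead of recomputing the full distance sum independently for every candidate.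
import Mathlib
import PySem

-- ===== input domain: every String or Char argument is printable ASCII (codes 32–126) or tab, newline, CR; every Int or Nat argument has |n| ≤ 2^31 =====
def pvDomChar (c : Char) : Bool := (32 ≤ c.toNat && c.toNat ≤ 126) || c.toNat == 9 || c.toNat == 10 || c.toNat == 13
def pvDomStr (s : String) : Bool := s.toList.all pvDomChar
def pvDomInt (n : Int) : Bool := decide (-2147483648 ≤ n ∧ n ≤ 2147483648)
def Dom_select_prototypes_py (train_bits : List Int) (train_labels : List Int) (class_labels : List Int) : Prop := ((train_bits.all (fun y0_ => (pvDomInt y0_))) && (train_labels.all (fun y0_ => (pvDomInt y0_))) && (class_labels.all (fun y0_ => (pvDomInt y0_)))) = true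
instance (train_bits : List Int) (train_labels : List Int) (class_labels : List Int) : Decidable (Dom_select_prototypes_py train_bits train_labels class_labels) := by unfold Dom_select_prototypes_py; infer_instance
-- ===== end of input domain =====

-- B replaces A's per-class rescan of the training set by one grouping pass over a dict and
-- replaces A's full distance-sum per candidate by one triangular pass charging each pair once to both ends.

-- ===== PORT A =====
-- _hamming_distance(left, right) = (left ^ right).bit_count()  (shared by both ports)
def pyHam (l r : Int) : Int := (PySem.Int.bitCount (PySem.Int.bxor l r) : Int)

-- _select_medoid(rows)
def selectMedoidA (rows : List Int) : Int :=
  if rows.length = 1 then rows.headD 0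
  else
    (rows.foldl (fun (st : Int × Option Int) cand =>
        let cost := rows.foldl (fun s other => s + pyHam cand other) 0
        match st.2 with
        | none => (cand, some cost)
        | some bc =>
          if cost < bc ∨ (cost = bc ∧ cand < st.1) then (cand, some cost) else st)
      (rows.headD 0, none)).1

def select_prototypes_py (train_bits : List Int) (train_labels : List Int) (class_labels : List Int) : List Int × List Int :=
  class_labels.foldl (fun (acc : List Int × List Int) c =>
    let class_rows := ((train_bits.zip train_labels).filter (fun p => p.2 == c)).map (·.1)
    if class_rows = [] then acc   -- Python raises ValueError here; Pre_ excludes these inputs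
    else (acc.1 ++ [selectMedoidA class_rows], acc.2 ++ [c])) ([], [])

-- ===== PORT B =====
-- _pair_costs(rows): loop 'for head in reversed(rows)' with state (costs, suffix)
def pairCosts (rows : List Int) : List Int :=
  (rows.reverse.foldl (fun (st : List Int × List Int) head =>
      let ds := st.2.map (fun r => pyHam head r)
      (ds.sum :: (ds.zip st.1).map (fun p => p.1 + p.2), head :: st.2))
    ([], [])).1

-- _medoid_by_pair_costs(rows)
def medoidByPairCosts (rows : List Int) : Int :=
  let costs := pairCosts rows
  (((rows.drop 1).zip (costs.drop 1)).foldl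
    (fun (st : Int × Int) p =>
      if p.2 < st.2 ∨ (p.2 = st.2 ∧ p.1 < st.1) then (p.1, p.2) else st)
    (rows.headD 0, costs.headD 0)).1

def select_prototypes_py_alt (train_bits : List Int) (train_labels : List Int) (class_labels : List Int) : List Int × List Int :=
  let groups := (train_labels.zip train_bits).foldl
      (fun (d : PySem.Dict Int (List Int)) p => d.modify p.1 [] (· ++ [p.2])) PySem.Dict.empty
  (class_labels.map (fun c => medoidByPairCosts (groups.getD c [])), class_labels)

-- ===== PRECONDITION & SPEC =====
-- Pre_ excludes exactly the inputs on which the Python A raises: a length mismatch between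
-- train_bits and train_labels while class_labels is nonempty (zip strict=True raises ValueError;
-- with class_labels = [] the zip is never evaluated and A returns ((), ())), and a class label
-- with no training row (the explicit ValueError).
def Pre_select_prototypes_py (train_bits : List Int) (train_labels : List Int) (class_labels : List Int) : Prop :=
  (class_labels = [] ∨ train_bits.length = train_labels.length) ∧ ∀ c ∈ class_labels, c ∈ train_labels
instance (train_bits : List Int) (train_labels : List Int) (class_labels : List Int) : Decidable (Pre_select_prototypes_py train_bits train_labels class_labels) := by unfold Pre_select_prototypes_py; infer_instance

def pvWitness_select_prototypes_py : List Int × List Int × List Int := ([5, 3, 6], [1, 2, 1], [1, 2])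

def Spec_select_prototypes_py (train_bits : List Int) (train_labels : List Int) (class_labels : List Int) (out : List Int × List Int) : Prop := out = select_prototypes_py_alt train_bits train_labels class_labels
instance (train_bits : List Int) (train_labels : List Int) (class_labels : List Int) (out : List Int × List Int) : Decidable (Spec_select_prototypes_py train_bits train_labels class_labels out) := by unfold Spec_select_prototypes_py; infer_instance

-- ===== CLAIM (what is proved, stated in full; the proofs are below) =====
def Claim_equal_select_prototypes_py : Prop := ∀ (train_bits : List Int) (train_labels : List Int) (class_labels : List Int), Dom_select_prototypes_py train_bits train_labels class_labels → Pre_select_prototypes_py train_bits train_labels class_labels → Spec_select_prototypes_py train_bits train_labels class_labels (select_prototypes_py train_bits train_labels class_labels)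

-- ===== LEMMAS AND PROOFS =====

-- full cost of a candidate: its distance sum over all rows
def fullCost (c : Int) (rows : List Int) : Int := (rows.map (pyHam c)).sum

-- the structural form of B's triangular pass
def tri : List Int → List Int
  | [] => []
  | r :: rest =>
    let ds := rest.map (fun o => pyHam r o)
    ds.sum :: (ds.zip (tri rest)).map (fun p => p.1 + p.2)

theorem pyHam_self (a : Int) : pyHam a a = 0 := by
  simp [pyHam]

theorem pyHam_comm (a b : Int) : pyHam a b = pyHam b a := by
  simp [pyHam, PySem.Int.bxor_comm]

theorem zip_self_map (f : Int → Int) (l : List Int) :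
    l.zip (l.map f) = l.map (fun x => (x, f x)) := by
  induction l with
  | nil => rfl
  | cons x xs ih => simp [ih]

theorem pairCosts_loop (rows : List Int) :
    rows.reverse.foldl (fun (st : List Int × List Int) head =>
      let ds := st.2.map (fun r => pyHam head r)
      (ds.sum :: (ds.zip st.1).map (fun p => p.1 + p.2), head :: st.2))
    ([], []) = (tri rows, rows) := by
  induction rows with
  | nil => simp [tri]
  | cons r rest ih =>
    simp only [List.reverse_cons, List.foldl_append, ih, List.foldl_cons, List.foldl_nil, tri]

theorem pairCosts_eq_tri (rows : List Int) : pairCosts rows = tri rows := by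
  rw [pairCosts, pairCosts_loop]

theorem tri_eq_map (rows : List Int) : tri rows = rows.map (fun c => fullCost c rows) := by
  induction rows with
  | nil => simp [tri]
  | cons r rest ih =>
    simp only [tri, ih, List.zip_map', List.map_map, List.map_cons]
    refine List.cons_eq_cons.mpr ⟨?_, ?_⟩
    · simp [fullCost, pyHam_self]
    · apply List.map_congr_left
      intro x _
      simp [Function.comp, fullCost, pyHam_comm x r]

theorem pairCosts_spec (rows : List Int) :
    pairCosts rows = rows.map (fun c => fullCost c rows) := by
  rw [pairCosts_eq_tri, tri_eq_map]

theorem cost_foldl (cand : Int) (rows : List Int) :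
    rows.foldl (fun s other => s + pyHam cand other) 0 = fullCost cand rows := by
  rw [PySem.List.foldl_add]
  simp [fullCost]

-- A's selection loop, once best_cost is some, equals B's selection loop (with f the captured cost)
theorem sel_loop (f : Int → Int) (rest : List Int) : ∀ (b c : Int),
    rest.foldl (fun (st : Int × Option Int) cand =>
        match st.2 with
        | none => (cand, some (f cand))
        | some bc =>
          if f cand < bc ∨ (f cand = bc ∧ cand < st.1) then (cand, some (f cand)) else st)
      (b, some c)
    = ((rest.foldl (fun (st : Int × Int) x =>
        if f x < st.2 ∨ (f x = st.2 ∧ x < st.1) then (x, f x) else st) (b, c)).1,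
       some (rest.foldl (fun (st : Int × Int) x =>
        if f x < st.2 ∨ (f x = st.2 ∧ x < st.1) then (x, f x) else st) (b, c)).2) := by
  induction rest with
  | nil => intro b c; rfl
  | cons x xs ih =>
    intro b c
    simp only [List.foldl_cons]
    by_cases h : f x < c ∨ (f x = c ∧ x < b)
    · simp only [if_pos h, ih]
    · simp only [if_neg h, ih]

theorem medoid_eq (rows : List Int) (h : rows ≠ []) :
    selectMedoidA rows = medoidByPairCosts rows := by
  obtain ⟨r, rest, rfl⟩ : ∃ a l, rows = a :: l := by
    cases rows with
    | nil => exact absurd rfl h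
    | cons a l => exact ⟨a, l, rfl⟩
  -- B side: unfold costs
  have hB : medoidByPairCosts (r :: rest)
      = (rest.foldl (fun (st : Int × Int) x =>
          if fullCost x (r :: rest) < st.2 ∨ (fullCost x (r :: rest) = st.2 ∧ x < st.1)
          then (x, fullCost x (r :: rest)) else st)
        (r, fullCost r (r :: rest))).1 := by
    simp only [medoidByPairCosts, pairCosts_spec, List.map_cons, List.drop_succ_cons,
      List.drop_zero, List.headD_cons]
    rw [zip_self_map, List.foldl_map]
  by_cases h1 : rest = []
  · subst h1
    simp [selectMedoidA, hB]
  · have hlen : (r :: rest).length ≠ 1 := by simpa using h1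
    rw [selectMedoidA, if_neg hlen, hB]
    simp only [List.headD_cons, cost_foldl]
    rw [List.foldl_cons]
    show (rest.foldl (fun (st : Int × Option Int) cand =>
          match st.2 with
          | none => (cand, some (fullCost cand (r :: rest)))
          | some bc => if fullCost cand (r :: rest) < bc ∨ (fullCost cand (r :: rest) = bc ∧ cand < st.1)
              then (cand, some (fullCost cand (r :: rest))) else st)
        (r, some (fullCost r (r :: rest)))).1 = _
    rw [sel_loop (fun cand => fullCost cand (r :: rest)) rest r (fullCost r (r :: rest))]

theorem group_eq (tb tl : List Int) (c : Int) :
    ((tl.zip tb).foldl (fun (d : PySem.Dict Int (List Int)) p => d.modify p.1 [] (· ++ [p.2]))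
        PySem.Dict.empty).getD c []
    = ((tb.zip tl).filter (fun p => p.2 == c)).map (·.1) := by
  rw [PySem.Dict.getD_foldl_modify_append]
  rw [show tl.zip tb = (tb.zip tl).map Prod.swap from (List.zip_swap tb tl).symm]
  rw [List.filter_map, List.map_map]
  simp [Function.comp_def]

theorem class_rows_ne_nil (tb tl : List Int) (c : Int)
    (hlen : tb.length = tl.length) (hc : c ∈ tl) :
    ((tb.zip tl).filter (fun p => p.2 == c)).map (·.1) ≠ [] := by
  have : c ∈ (tb.zip tl).map (·.2) := by
    rw [List.map_snd_zip (le_of_eq hlen.symm)]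
    exact hc
  obtain ⟨p, hp, hpc⟩ := List.mem_map.mp this
  have hmem : p ∈ (tb.zip tl).filter (fun p => p.2 == c) :=
    List.mem_filter.mpr ⟨hp, by simp [hpc]⟩
  intro hnil
  rw [List.map_eq_nil_iff] at hnil
  rw [hnil] at hmem
  exact absurd hmem (List.not_mem_nil)

-- ===== VERDICT (by name: the statement is the Claim_ definition above) =====
theorem select_prototypes_py_spec : Claim_equal_select_prototypes_py := by
  intro tb tl cl _ hpre
  obtain ⟨hor, hcls⟩ := hpre
  unfold Spec_select_prototypes_py select_prototypes_py select_prototypes_py_alt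
  have hrows : ∀ c ∈ cl, ((tb.zip tl).filter (fun p => p.2 == c)).map (·.1) ≠ [] :=
    fun c hc => class_rows_ne_nil tb tl c
      (hor.resolve_left (fun hnil => by rw [hnil] at hc; exact absurd hc (List.not_mem_nil)))
      (hcls c hc)
  have h1 := PySem.List.foldl_congr_mem (l := cl) (init := (([] : List Int), ([] : List Int)))
    (f := fun (acc : List Int × List Int) c =>
      if ((tb.zip tl).filter (fun p => p.2 == c)).map (·.1) = [] then acc
      else (acc.1 ++ [selectMedoidA (((tb.zip tl).filter (fun p => p.2 == c)).map (·.1))], acc.2 ++ [c]))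
    (g := fun (acc : List Int × List Int) c =>
      (acc.1 ++ [selectMedoidA (((tb.zip tl).filter (fun p => p.2 == c)).map (·.1))], acc.2 ++ [c]))
    (fun acc c hc => by simp only [if_neg (hrows c hc)])
  refine Eq.trans h1 ?_
  rw [PySem.List.foldl_prod_mk
    (f := fun (a : List Int) c => a ++ [selectMedoidA (((tb.zip tl).filter (fun p => p.2 == c)).map (·.1))])
    (g := fun (a : List Int) c => a ++ [c])]
  rw [PySem.List.foldl_append_singleton_eq_map, PySem.List.foldl_append_singleton_eq_self]
  simp only [List.nil_append]
  refine Prod.ext ?_ rfl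
  simp only
  apply List.map_congr_left
  intro c hc
  rw [group_eq, medoid_eq _ (hrows c hc)]
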